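-- pv_equiv track=rewrite | github.com/bwang1008/AdventOfCode2023 | day14B.py | tilt_west
-- ===== SOURCE A (Python) =====
-- from typing import Dict, List
--
-- ROUND: str = "O"
--
-- SQUARE: str = "#"
--
-- EMPTY: str = "."
--
-- def tilt_west(board: List[List[str]]) -> List[List[str]]:
--     R: int = len(board)
--     C: int = len(board[0])
--
--     for row in range(R):
--         next_final_position: int = 0  # col of next round stone when rolled west
--
--         for col in range(C):
--             if board[row][col] == SQUARE:
--                 next_final_position = col + 1
--             elif board[row][col] == ROUND:
--                 board[row][col] = EMPTY
--                 board[row][next_final_position] = ROUND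
--                 next_final_position += 1
--
--     return board
-- ===== SOURCE B (Python) =====
-- from typing import List
--
--
-- def _settle(stretch: List[str]) -> List[str]:
--     """Pack the round stones of a wall-free stretch against its left end.
--
--     Each stone leaves "." behind where it stood; cells that no stone
--     reaches keep their contents.
--     """
--     k = stretch.count("O")
--     return ["O"] * k + ["." if c == "O" else c for c in stretch[k:]]
--
--
-- def tilt_west(board: List[List[str]]) -> List[List[str]]:
--     width = len(board[0])
--     for row in board:
--         tilted: List[str] = []
--         stretch: List[str] = []
--         for c in row[:width]:
--             if c == "#":
--                 tilted += _settle(stretch) + ["#"]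
--                 stretch = []
--             else:
--                 stretch.append(c)
--         row[:width] = tilted + _settle(stretch)
--     return board
-- ===== Notes on version B (the rewrite author's own statement) =====
-- stated objective: alternative
-- what changed: B splits the width-wide part of each row into wall-delimited stretches and rebuilds each stretch from a count of its round stones, instead of A's per-stone two-write pointer shuffle; Pre_ excludes only the inputs where A raises IndexError (empty board, or a row shorter than the first row).
import Mathlib
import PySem

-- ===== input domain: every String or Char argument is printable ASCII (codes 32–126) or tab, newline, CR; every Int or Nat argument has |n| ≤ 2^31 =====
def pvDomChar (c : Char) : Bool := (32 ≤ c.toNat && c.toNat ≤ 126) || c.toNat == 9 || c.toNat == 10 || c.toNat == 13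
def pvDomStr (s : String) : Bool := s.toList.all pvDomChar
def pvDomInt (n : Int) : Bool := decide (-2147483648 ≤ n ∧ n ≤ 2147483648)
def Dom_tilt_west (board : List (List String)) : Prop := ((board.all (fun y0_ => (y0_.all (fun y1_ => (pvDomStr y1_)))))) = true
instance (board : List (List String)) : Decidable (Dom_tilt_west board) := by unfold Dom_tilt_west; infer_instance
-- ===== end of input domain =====

-- B rebuilds each wall-delimited stretch of the board's width-wide area from a count of its
-- round stones instead of A's per-stone pointer writes; return values are proved equal (both
-- programs also mutate the same inner row lists in place).

-- ===== PORT A =====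
-- one iteration of A's inner `for col in range(C)` body; state = (row, next_final_position)
def stepA (st : List String × Nat) (col : Nat) : List String × Nat :=
  if st.1.getD col "" == "#" then (st.1, col + 1)
  else if st.1.getD col "" == "O" then
    ((st.1.set col ".").set st.2 "O", st.2 + 1)
  else st

-- A's inner loop over one row (Pre_ guarantees col < row.length, so getD is exact)
def tiltRowA (row : List String) (C : Nat) : List String :=
  ((List.range C).foldl stepA (row, 0)).1

def tilt_west (board : List (List String)) : List (List String) :=
  board.map (fun row => tiltRowA row board.headI.length)

-- ===== PORT B =====
-- Source B's _settle: k O's, then the rest of the stretch with each O replaced by '.'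
def settleB (stretch : List String) : List String :=
  let k := stretch.count "O"
  List.replicate k "O" ++ (stretch.drop k).map (fun c => if c == "O" then "." else c)

-- one iteration of Source B's `for c in row[:width]` body; state = (tilted, stretch)
def stepB (st : List String × List String) (c : String) : List String × List String :=
  if c == "#" then (st.1 ++ settleB st.2 ++ ["#"], [])
  else (st.1, st.2 ++ [c])

-- Source B's loop body for one row; `row[:width] = …` keeps the cells past `width`
def tiltRowB (row : List String) (width : Nat) : List String :=
  let st := (row.take width).foldl stepB ([], [])
  st.1 ++ settleB st.2 ++ row.drop width

def tilt_west_alt (board : List (List String)) : List (List String) :=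
  board.map (fun row => tiltRowB row board.headI.length)

-- ===== PRECONDITION & SPEC =====
-- Pre_ excludes exactly the inputs on which A raises IndexError: the empty board
-- (board[0]) and boards with a row shorter than the first row.
def Pre_tilt_west (board : List (List String)) : Prop :=
  board ≠ [] ∧ ∀ row ∈ board, board.headI.length ≤ row.length

instance (board : List (List String)) : Decidable (Pre_tilt_west board) := by
  unfold Pre_tilt_west; infer_instance

def pvWitness_tilt_west : List (List String) :=
  [[".", "O", "#", ".", "O", "O"], ["O", ".", ".", "#", "O", "."]]

def Spec_tilt_west (board : List (List String)) (out : List (List String)) : Prop := out = tilt_west_alt board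
instance (board : List (List String)) (out : List (List String)) : Decidable (Spec_tilt_west board out) := by unfold Spec_tilt_west; infer_instance

-- ===== CLAIM (what is proved, stated in full; the proofs are below) =====
def Claim_equal_tilt_west : Prop := ∀ (board : List (List String)), Dom_tilt_west board → Pre_tilt_west board → Spec_tilt_west board (tilt_west board)

-- ===== LEMMAS AND PROOFS =====

-- functional spec of one row: process `rest`, `pending` = current open stretch
def tiltSeg (pending rest : List String) : List String :=
  match rest with
  | [] => settleB pending
  | c :: cs =>
    if c == "#" then settleB pending ++ "#" :: tiltSeg [] cs
    else tiltSeg (pending ++ [c]) cs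

lemma foldB_spec (rest : List String) : ∀ (acc pending : List String),
    (rest.foldl stepB (acc, pending)).1 ++ settleB (rest.foldl stepB (acc, pending)).2
      = acc ++ tiltSeg pending rest := by
  induction rest with
  | nil => intro acc pending; simp [tiltSeg]
  | cons c cs ih =>
    intro acc pending
    simp only [List.foldl_cons, stepB, tiltSeg]
    by_cases h : c == "#"
    · simp only [h, if_pos]; rw [ih]; simp
    · simp only [h, if_neg, Bool.false_eq_true, not_false_iff]
      rw [ih]

lemma tiltRowB_spec (row : List String) (width : Nat) :
    tiltRowB row width = tiltSeg [] (row.take width) ++ row.drop width := by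
  show (List.foldl stepB ([], []) (row.take width)).1
      ++ settleB (List.foldl stepB ([], []) (row.take width)).2 ++ row.drop width
      = tiltSeg [] (row.take width) ++ row.drop width
  rw [foldB_spec]
  simp

lemma set_append_right {α : Type} (X : List α) (Y : List α) (i : Nat) (v : α) :
    (X ++ Y).set (X.length + i) v = X ++ Y.set i v := by
  induction X with
  | nil => simp
  | cons x xs ih => simpa [Nat.succ_add] using ih

lemma getD_append_mid {α : Type} (X : List α) (c : α) (Z : List α) (d : α) :
    (X ++ c :: Z).getD X.length d = c := by
  simp [List.getD]

lemma set_mid (X Z : List String) (c v : String) :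
    (X ++ c :: Z).set X.length v = X ++ v :: Z := by
  simpa using set_append_right X (c :: Z) 0 v

lemma settleB_length (seg : List String) : (settleB seg).length = seg.length := by
  have := List.count_le_length (l := seg) (a := "O")
  simp [settleB]
  omega

lemma stepA_mid (X Z : List String) (c : String) (nfp : Nat) :
    stepA (X ++ c :: Z, nfp) X.length =
      if c = "#" then (X ++ c :: Z, X.length + 1)
      else if c = "O" then (((X ++ c :: Z).set X.length ".").set nfp "O", nfp + 1)
      else (X ++ c :: Z, nfp) := by
  unfold stepA
  rw [show ((X ++ c :: Z, nfp) : List String × Nat).1 = X ++ c :: Z from rfl,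
     getD_append_mid X c Z ""]
  simp only [beq_iff_eq]

lemma shuffle (pending Z : List String) :
    ((pending.drop (pending.count "O")).map (fun c => if c == "O" then "." else c)
        ++ "." :: Z).set 0 "O"
      = "O" :: (((pending ++ ["O"]).drop (pending.count "O" + 1)).map
          (fun c => if c == "O" then "." else c) ++ Z) := by
  have hp : pending.count "O" ≤ pending.length := List.count_le_length
  cases h : pending.drop (pending.count "O") with
  | nil =>
    have hlen : pending.length ≤ pending.count "O" := by
      have := congrArg List.length h
      simp at this
      omega
    have hd : (pending ++ ["O"]).drop (pending.count "O" + 1) = [] := by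
      apply List.drop_eq_nil_of_le
      simp
      omega
    simp [h, hd]
  | cons d ds =>
    have hlt : pending.count "O" < pending.length := by
      by_contra hcon
      have : pending.drop (pending.count "O") = [] := List.drop_eq_nil_of_le (by omega)
      simp [this] at h
    have hd : (pending ++ ["O"]).drop (pending.count "O" + 1)
        = pending.drop (pending.count "O" + 1) ++ ["O"] := by
      rw [List.drop_append_of_le_length (by omega)]
    have hds : pending.drop (pending.count "O" + 1) = ds := by
      have : List.drop 1 (pending.drop (pending.count "O")) = List.drop (pending.count "O" + 1) pending := by
        rw [List.drop_drop]
      rw [← this, h]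
      simp
    simp [hd, hds]

-- main invariant: A's fold from a stretch start equals tiltSeg on the remaining cells
lemma foldA_spec (rest : List String) : ∀ (P0 pending after : List String),
    ((List.range' (P0.length + pending.length) rest.length).foldl stepA
        (P0 ++ List.replicate (pending.count "O") "O"
            ++ (pending.drop (pending.count "O")).map (fun c => if c == "O" then "." else c)
            ++ rest ++ after,
         P0.length + pending.count "O")).1
      = P0 ++ tiltSeg pending rest ++ after := by
  induction rest with
  | nil =>
    intro P0 pending after
    simp [tiltSeg, settleB]
  | cons c cs ih =>
    intro P0 pending after
    have hp : pending.count "O" ≤ pending.length := List.count_le_length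
    have hlenX : (P0 ++ (List.replicate (pending.count "O") "O"
        ++ (pending.drop (pending.count "O")).map (fun c => if c == "O" then "." else c))).length
        = P0.length + pending.length := by
      simp
      omega
    have hr : P0 ++ List.replicate (pending.count "O") "O"
            ++ (pending.drop (pending.count "O")).map (fun c => if c == "O" then "." else c)
            ++ (c :: cs) ++ after
        = (P0 ++ (List.replicate (pending.count "O") "O"
            ++ (pending.drop (pending.count "O")).map (fun c => if c == "O" then "." else c)))
          ++ c :: (cs ++ after) := by
      simp [List.append_assoc]
    rw [show (c :: cs).length = cs.length + 1 from rfl, List.range'_succ, List.foldl_cons, hr,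
       ← hlenX, stepA_mid]
    by_cases hsq : c = "#"
    · subst hsq
      rw [if_pos rfl, hlenX]
      have inst := ih (P0 ++ settleB pending ++ ["#"]) [] after
      simp only [List.count_nil, List.drop_nil, List.map_nil, List.replicate_zero,
        List.append_nil, List.length_append, settleB_length,
        List.length_cons, List.length_nil, Nat.add_zero] at inst
      simpa [tiltSeg, settleB, List.append_assoc] using inst
    · rw [if_neg hsq]
      by_cases hrd : c = "O"
      · subst hrd
        rw [if_pos rfl, set_mid]
        have hg : P0 ++ (List.replicate (pending.count "O") "O"
              ++ (pending.drop (pending.count "O")).map (fun c => if c == "O" then "." else c))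
              ++ "." :: (cs ++ after)
            = (P0 ++ List.replicate (pending.count "O") "O")
              ++ ((pending.drop (pending.count "O")).map (fun c => if c == "O" then "." else c)
                  ++ "." :: (cs ++ after)) := by
          simp [List.append_assoc]
        have hnfp : P0.length + pending.count "O"
            = (P0 ++ List.replicate (pending.count "O") "O").length + 0 := by simp
        rw [hg, hnfp, set_append_right, shuffle pending (cs ++ after)]
        have inst := ih P0 (pending ++ ["O"]) after
        have hc : (pending ++ ["O"]).count "O" = pending.count "O" + 1 := by simp
        simp only [hc, List.length_append, List.length_cons, List.length_nil] at inst
        have e2 : pending.count "O" + (pending.length - pending.count "O") = pending.length := by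
          omega
        simpa [tiltSeg, List.append_assoc, List.replicate_succ', e2, Nat.add_assoc] using inst
      · rw [if_neg hrd]
        have inst := ih P0 (pending ++ [c]) after
        have hc : (pending ++ [c]).count "O" = pending.count "O" := by
          simp [List.count_append, hrd]
        have hdp : (pending ++ [c]).drop (pending.count "O")
            = pending.drop (pending.count "O") ++ [c] := by
          rw [List.drop_append_of_le_length hp]
        simp only [hc, hdp, List.length_append, List.length_cons, List.length_nil,
          List.map_append, List.map_cons, List.map_nil] at inst
        simp only [beq_iff_eq, hrd, if_false] at inst
        have e2 : pending.count "O" + (pending.length - pending.count "O") = pending.length := by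
          omega
        simpa [tiltSeg, hsq, hrd, List.append_assoc, e2, Nat.add_assoc] using inst

lemma row_eq (row : List String) (C : Nat) (h : C ≤ row.length) :
    tiltRowA row C = tiltRowB row C := by
  have hmain := foldA_spec (row.take C) [] [] (row.drop C)
  simp only [List.length_nil, List.count_nil, List.drop_nil, List.replicate_zero,
    List.map_nil, List.nil_append, List.append_nil, Nat.zero_add] at hmain
  rw [List.take_append_drop] at hmain
  rw [tiltRowB_spec]
  unfold tiltRowA
  rw [List.range_eq_range']
  have hlen : (row.take C).length = C := by simp [Nat.min_eq_left h]
  rw [hlen] at hmain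
  exact hmain

-- ===== VERDICT (by name: the statement is the Claim_ definition above) =====
theorem tilt_west_spec : Claim_equal_tilt_west := by
  intro board _ hPre
  unfold Spec_tilt_west tilt_west tilt_west_alt
  exact List.map_congr_left (fun row hrow => row_eq row board.headI.length (hPre.2 row hrow))
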